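/- GENERATED by c/gen_code.py from toyh.elf, the PROGRAM only (the base is in the shared library): where each function is linked. -/
import X86.Derived.User.State
namespace Toyh.Code
open X86

def addr_prog_main : Word := 0x105000
def addr_clamp_length : Word := 0x1050e0
def addr__sub_I_65535_1 : Word := 0x105180

/-- Every function: name, address, size in bytes. -/
def functions : List (String × Word × Nat) :=
  [ ("prog_main", 0x105000, 89)
  , ("clamp_length", 0x1050e0, 27)
  , ("_sub_I_65535_1", 0x105180, 24) ]

end Toyh.Code
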